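-- pv_equiv track=rewrite | github.com/byung-u/theCross | scritps/2.dump_bible.py | get_bible_contents
-- ===== SOURCE A (Python) =====
-- def get_bible_contents(contents_array):
--     subject = []
--     content = []
--     find_subject = 0
--     for c in contents_array:
--         if find_subject == 0:
--             if (c.find('<') != -1):
--                 subject.append(c.replace('<', ''))
--             elif (c.find('>') != -1):
--                 subject.append(c.replace('>', ''))
--                 find_subject = 1
--             else:
--                 subject.append(c)
--         else:
--             content.append(c)
--     return (' '.join(subject)), (' '.join(content))
-- ===== SOURCE B (Python) =====
-- def _clean(c):
--     if c.find('<') != -1: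
--         return c.replace('<', '')
--     elif c.find('>') != -1:
--         return c.replace('>', '')
--     return c
--
-- def get_bible_contents(contents_array):
--     split = len(contents_array)
--     for i, c in enumerate(contents_array):
--         if c.find('>') != -1 and c.find('<') == -1:
--             split = i
--             break
--     subject = [_clean(c) for c in contents_array[:split + 1]]
--     content = contents_array[split + 1:]
--     return ' '.join(subject), ' '.join(content)
-- ===== Notes on version B (the rewrite author's own statement) =====
-- stated objective: alternative
-- what changed: Replaced the single stateful flag-driven loop with a boundary search for the first line containing '>' but no '<', then a map-clean pass over the prefix slice and the unchanged suffix slice joined as content.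
import Mathlib
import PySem

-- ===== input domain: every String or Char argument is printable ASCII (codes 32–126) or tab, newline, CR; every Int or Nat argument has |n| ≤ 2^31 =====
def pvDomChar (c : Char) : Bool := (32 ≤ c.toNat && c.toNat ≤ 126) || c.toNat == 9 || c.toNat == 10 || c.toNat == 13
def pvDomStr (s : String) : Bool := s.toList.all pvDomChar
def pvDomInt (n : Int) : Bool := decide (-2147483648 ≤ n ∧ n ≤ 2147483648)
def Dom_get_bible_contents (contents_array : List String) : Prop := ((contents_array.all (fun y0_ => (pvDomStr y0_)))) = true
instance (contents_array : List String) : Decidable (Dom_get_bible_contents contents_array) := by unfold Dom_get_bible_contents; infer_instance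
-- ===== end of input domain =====

-- B replaces A's stateful flag-driven single loop by a boundary search (first line with '>' and no '<')
-- followed by two slice passes (map-clean prefix, unchanged suffix); objective: alternative decomposition.


-- ===== PORT A =====
def pvStepA (st : List String × List String × Int) (c : String) : List String × List String × Int :=
  if st.2.2 == 0 then
    if PySem.Str.find c "<" ≠ -1 then (st.1 ++ [PySem.Str.replace c "<" ""], st.2.1, st.2.2)
    else if PySem.Str.find c ">" ≠ -1 then (st.1 ++ [PySem.Str.replace c ">" ""], st.2.1, 1)
    else (st.1 ++ [c], st.2.1, st.2.2)
  else (st.1, st.2.1 ++ [c], st.2.2)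

def get_bible_contents (contents_array : List String) : String × String :=
  let r := contents_array.foldl pvStepA ([], [], 0)
  (PySem.Str.join " " r.1, PySem.Str.join " " r.2.1)

-- ===== PORT B =====
def pvClean (c : String) : String :=
  if PySem.Str.find c "<" ≠ -1 then PySem.Str.replace c "<" ""
  else if PySem.Str.find c ">" ≠ -1 then PySem.Str.replace c ">" ""
  else c

def pvFindSplit : List String → Nat
  | [] => 0
  | c :: rest =>
    if PySem.Str.find c ">" ≠ -1 ∧ PySem.Str.find c "<" = -1 then 0 else pvFindSplit rest + 1

def get_bible_contents_alt (contents_array : List String) : String × String :=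
  let split := pvFindSplit contents_array
  (PySem.Str.join " " ((contents_array.take (split + 1)).map pvClean),
   PySem.Str.join " " (contents_array.drop (split + 1)))

-- ===== PRECONDITION & SPEC =====
def Spec_get_bible_contents (contents_array : List String) (out : String × String) : Prop := out = get_bible_contents_alt contents_array
instance (contents_array : List String) (out : String × String) : Decidable (Spec_get_bible_contents contents_array out) := by unfold Spec_get_bible_contents; infer_instance

-- ===== CLAIM (what is proved, stated in full; the proofs are below) =====
def Claim_equal_get_bible_contents : Prop := ∀ (contents_array : List String), Dom_get_bible_contents contents_array → Spec_get_bible_contents contents_array (get_bible_contents contents_array)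

-- ===== LEMMAS AND PROOFS =====

-- once the flag is 1, A only appends to content
theorem foldl_stepA_one (xs : List String) (s c : List String) :
    xs.foldl pvStepA (s, c, (1 : Int)) = (s, c ++ xs, 1) := by
  induction xs generalizing c with
  | nil => simp
  | cons x rest ih => simp [pvStepA, ih]

-- the flag-0 phase equals boundary search + slice passes
theorem foldl_stepA_zero (xs : List String) (s : List String) :
    xs.foldl pvStepA (s, [], (0 : Int)) =
      (s ++ (xs.take (pvFindSplit xs + 1)).map pvClean,
       xs.drop (pvFindSplit xs + 1),
       if pvFindSplit xs < xs.length then (1 : Int) else 0) := by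
  induction xs generalizing s with
  | nil => simp [pvFindSplit]
  | cons x rest ih =>
    rcases eq_or_ne (PySem.Chars.find x.toList ['<']) (-1) with hlt | hlt
    · rcases eq_or_ne (PySem.Chars.find x.toList ['>']) (-1) with hgt | hgt
      · have hstep : pvStepA (s, [], (0 : Int)) x = (s ++ [x], [], 0) := by
          simp [pvStepA, hlt, hgt]
        have hsplit : pvFindSplit (x :: rest) = pvFindSplit rest + 1 := by
          simp [pvFindSplit, hgt]
        rw [List.foldl_cons, hstep, ih, hsplit]
        simp [pvClean, hlt, hgt]
      · have hstep : pvStepA (s, [], (0 : Int)) x = (s ++ [PySem.Str.replace x ">" ""], [], 1) := by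
          simp [pvStepA, hlt, hgt]
        have hsplit : pvFindSplit (x :: rest) = 0 := by
          simp [pvFindSplit, hlt, hgt]
        rw [List.foldl_cons, hstep, foldl_stepA_one, hsplit]
        simp [pvClean, hlt, hgt]
    · have hstep : pvStepA (s, [], (0 : Int)) x = (s ++ [PySem.Str.replace x "<" ""], [], 0) := by
        simp [pvStepA, hlt]
      have hsplit : pvFindSplit (x :: rest) = pvFindSplit rest + 1 := by
        simp [pvFindSplit, hlt]
      rw [List.foldl_cons, hstep, ih, hsplit]
      simp [pvClean, hlt]

-- ===== VERDICT (by name: the statement is the Claim_ definition above) =====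
theorem get_bible_contents_spec : Claim_equal_get_bible_contents := by
  intro xs _
  unfold Spec_get_bible_contents get_bible_contents get_bible_contents_alt
  rw [foldl_stepA_zero xs []]
  simp
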